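-- pv_equiv track=rewrite | github.com/paiml/depyler | examples/hard_crypto_hash.py | perfect_hash_small
-- ===== SOURCE A (Python) =====
-- from typing import Dict, List, Optional, Tuple
--
-- def djb2_hash(data: str) -> int:
--     """DJB2 hash function by Dan Bernstein."""
--     h: int = 5381
--     for ch in data:
--         h = ((h << 5) + h) + ord(ch)
--         h = h & 0xFFFFFFFF
--     return h
--
-- def perfect_hash_small(keys: List[str]) -> Dict[str, int]:
--     """Build a minimal perfect hash for a small set via linear probing."""
--     n: int = len(keys)
--     if n == 0:
--         return {}
--     table_size: int = n * 2
--     result: Dict[str, int] = {}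
--     used: List[int] = []
--     for i in range(table_size):
--         used.append(0)
--     for key in keys:
--         h: int = djb2_hash(key) % table_size
--         attempt: int = 0
--         while used[h] == 1 and attempt < table_size:
--             h = (h + 1) % table_size
--             attempt += 1
--         used[h] = 1
--         result[key] = h
--     return result
-- ===== SOURCE B (Python) =====
-- def djb2_hash(data):
--     h = 5381
--     for ch in data:
--         h = ((h << 5) + h + ord(ch)) & 0xFFFFFFFF
--     return h
--
-- def _first_at_least(sorted_list, x):
--     """Index of the first element >= x (len(sorted_list) if there is none)."""
--     lo = 0
--     hi = len(sorted_list)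
--     while lo < hi:
--         mid = (lo + hi) // 2
--         if sorted_list[mid] < x:
--             lo = mid + 1
--         else:
--             hi = mid
--     return lo
--
-- def perfect_hash_small(keys):
--     """Sorted free-list: binary-search the cyclically-first free slot at or
--     after the hash (wrapping to the smallest free slot), instead of linear
--     probing over a used-flags array."""
--     n = len(keys)
--     if n == 0:
--         return {}
--     m = n * 2
--     free = list(range(m))  # stays sorted
--     result = {}
--     for key in keys:
--         h = djb2_hash(key) % m
--         i = _first_at_least(free, h)
--         if i == len(free):
--             i = 0
--         result[key] = free.pop(i)
--     return result
-- ===== Notes on version B (the rewrite author's own statement) =====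
-- stated objective: faster
-- what changed: Replaces A's linear-probe scan over a mutable used-flags array by a sorted free-slot list: a hand-written binary search finds the cyclically-first free slot at or after the hash (wrapping to the smallest free slot), which is then popped.
import Mathlib
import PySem

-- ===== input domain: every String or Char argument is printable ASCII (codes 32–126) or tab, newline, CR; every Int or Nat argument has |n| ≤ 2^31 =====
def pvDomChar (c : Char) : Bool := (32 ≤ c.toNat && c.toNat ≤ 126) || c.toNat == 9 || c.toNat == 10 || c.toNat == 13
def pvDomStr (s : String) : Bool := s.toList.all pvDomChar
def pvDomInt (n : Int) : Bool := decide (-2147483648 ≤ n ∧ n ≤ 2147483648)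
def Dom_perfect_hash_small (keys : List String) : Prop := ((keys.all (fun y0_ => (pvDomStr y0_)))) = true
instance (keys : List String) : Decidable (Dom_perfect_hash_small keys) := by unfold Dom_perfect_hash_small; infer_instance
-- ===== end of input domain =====

-- B replaces A's linear-probe loop over a used-flags array by a sorted free-slot list with a
-- hand-written binary search for the cyclically-first free slot at or after the hash
-- (wrapping to the smallest free slot); same results, no probe chains.

-- ===== PORT A =====
-- shared helper (identical in both Python files): djb2_hash
def djb2_hash (data : String) : Int :=
  data.toList.foldl
    (fun h ch => PySem.Int.band (((h <<< (5 : Nat)) + h) + (ch.toNat : Int)) 0xFFFFFFFF) 5381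

-- A's while loop: 'while used[h] == 1 and attempt < table_size'; fuel = table_size - attempt
def probeA (used : List Int) (m : Int) : Int → Nat → Int
  | h, 0 => h
  | h, fuel+1 =>
    if PySem.List.pyGet? used h = some 1 then probeA used m (PySem.Int.mod (h + 1) m) fuel
    else h

def perfect_hash_small (keys : List String) : List (String × Int) :=
  let n : Int := keys.length
  if n == 0 then [] else
    let tableSize : Int := n * 2
    -- for i in range(table_size): used.append(0)
    let used : List Int := (PySem.List.pyRange 0 tableSize 1).foldl (fun acc _ => acc ++ [(0 : Int)]) []
    let st := keys.foldl
      (fun (st : PySem.Dict String Int × List Int) key =>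
        let h0 := PySem.Int.mod (djb2_hash key) tableSize
        let h := probeA st.2 tableSize h0 tableSize.toNat
        -- used[h] = 1  (h is a positive-modulus residue, so 0 ≤ h and .toNat is exact)
        (st.1.insert key h, st.2.set h.toNat 1))
      (PySem.Dict.empty, used)
    st.1.items

-- ===== PORT B =====
-- B's helper _first_at_least: binary search, 'while lo < hi' as recursion on (lo, hi)
def firstAtLeast (sortedList : List Int) (x : Int) (lo hi : Int) : Int :=
  if lo < hi then
    let mid := PySem.Int.floordiv (lo + hi) 2
    -- sorted_list[mid]: mid is always in range here; .getD 0 only totalises pyGet?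
    if (PySem.List.pyGet? sortedList mid).getD 0 < x then firstAtLeast sortedList x (mid + 1) hi
    else firstAtLeast sortedList x lo mid
  else lo
termination_by (hi - lo).toNat
decreasing_by
  · have hb := PySem.Int.floordiv_two_mid_bounds (lo := lo) (hi := hi) (by omega)
    omega
  · have hb := PySem.Int.floordiv_two_mid_bounds (lo := lo) (hi := hi) (by omega)
    have h1 : PySem.Int.floordiv (lo + hi) 2 < hi := by
      rw [PySem.Int.floordiv_lt_iff_lt_mul (by norm_num)]
      omega
    omega

def perfect_hash_small_alt (keys : List String) : List (String × Int) :=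
  let n : Int := keys.length
  if n == 0 then [] else
    let m : Int := n * 2
    let free0 : List Int := PySem.List.pyRange 0 m 1   -- list(range(m)); stays sorted
    let st := keys.foldl
      (fun (st : PySem.Dict String Int × List Int) key =>
        let h := PySem.Int.mod (djb2_hash key) m
        let i0 := firstAtLeast st.2 h 0 (st.2.length : Int)
        let i := if i0 == (st.2.length : Int) then 0 else i0
        -- free.pop(i): i is always in range here; .getD (0, st.2) only totalises pop?
        let p := (PySem.List.pop? st.2 i).getD (0, st.2)
        (st.1.insert key p.1, p.2))
      (PySem.Dict.empty, free0)
    st.1.items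

-- ===== PRECONDITION & SPEC =====
def Spec_perfect_hash_small (keys : List String) (out : List (String × Int)) : Prop := out = perfect_hash_small_alt keys
instance (keys : List String) (out : List (String × Int)) : Decidable (Spec_perfect_hash_small keys out) := by unfold Spec_perfect_hash_small; infer_instance

-- ===== CLAIM (what is proved, stated in full; the proofs are below) =====
def Claim_equal_perfect_hash_small : Prop := ∀ (keys : List String), Dom_perfect_hash_small keys → Spec_perfect_hash_small keys (perfect_hash_small keys)

-- ===== LEMMAS AND PROOFS =====

-- the relation between A's used-flags array and B's sorted free list, for table size m
def PHInv (m : Int) (used : List Int) (free : List Int) : Prop :=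
  used.length = m.toNat ∧ free.Pairwise (· < ·) ∧
  (∀ s ∈ free, 0 ≤ s ∧ s < m) ∧
  (∀ s : Int, 0 ≤ s → s < m → (s ∈ free ↔ PySem.List.pyGet? used s ≠ some 1))

lemma mod_shift (m a k : Int) (hm : 0 < m) :
    PySem.Int.mod (PySem.Int.mod a m + k) m = PySem.Int.mod (a + k) m := by
  rw [PySem.Int.mod_eq_emod_of_pos hm, PySem.Int.mod_eq_emod_of_pos hm,
      PySem.Int.mod_eq_emod_of_pos hm]
  exact Int.emod_add_emod a m k

lemma mod_id (m s : Int) (h0 : 0 ≤ s) (h1 : s < m) : PySem.Int.mod s m = s := by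
  rw [PySem.Int.mod_eq_emod_of_pos (lt_of_le_of_lt h0 h1)]
  exact Int.emod_eq_of_lt h0 h1

lemma probeA_eq (used : List Int) (m : Int) (hm : 0 < m) :
    ∀ (d : Nat) (h : Int) (fuel : Nat), 0 ≤ h → h < m → d ≤ fuel →
    (∀ k : Nat, k < d → PySem.List.pyGet? used (PySem.Int.mod (h + k) m) = some 1) →
    PySem.List.pyGet? used (PySem.Int.mod (h + d) m) ≠ some 1 →
    probeA used m h fuel = PySem.Int.mod (h + d) m := by
  intro d
  induction d with
  | zero =>
    intro h fuel h0 h1 _ _ hfree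
    have hh : PySem.Int.mod (h + (0:Nat)) m = h := by
      rw [Nat.cast_zero, add_zero]; exact mod_id m h h0 h1
    rw [hh] at hfree ⊢
    cases fuel with
    | zero => rfl
    | succ f => simp [probeA, hfree]
  | succ d ih =>
    intro h fuel h0 h1 hdf hused hfree
    cases fuel with
    | zero => omega
    | succ f =>
      have hh0 : PySem.List.pyGet? used h = some 1 := by
        have := hused 0 (by omega)
        simpa [mod_id m h h0 h1] using this
      have key : ∀ k : Nat, PySem.Int.mod (PySem.Int.mod (h+1) m + (k:Int)) m
          = PySem.Int.mod (h + ((k+1 : Nat):Int)) m := by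
        intro k; rw [mod_shift m (h+1) k hm]; push_cast; ring_nf
      simp only [probeA, hh0, if_true]
      have hgoal : PySem.Int.mod (h + ((d+1 : Nat):Int)) m
          = PySem.Int.mod (PySem.Int.mod (h+1) m + (d:Int)) m := (key d).symm
      rw [hgoal] at hfree ⊢
      exact ih (PySem.Int.mod (h+1) m) f (PySem.Int.mod_nonneg _ hm) (PySem.Int.mod_lt _ hm)
        (by omega)
        (fun k hk => by rw [key k]; exact hused (k+1) (by omega))
        hfree

lemma pyGetD_nat (xs : List Int) (j : Nat) (hj : j < xs.length) :
    (PySem.List.pyGet? xs (j : Int)).getD 0 = xs[j] := by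
  rw [PySem.List.pyGet?_natCast, List.getElem?_eq_getElem hj, Option.getD_some]

lemma firstAtLeast_spec (xs : List Int) (x : Int) (hsort : xs.Pairwise (· ≤ ·)) :
    ∀ (fuel : Nat) (lo hi : Int), (hi - lo).toNat = fuel → 0 ≤ lo → lo ≤ hi → hi ≤ (xs.length : Int) →
    (∀ j : Nat, (j : Int) < lo → ∀ hj : j < xs.length, xs[j] < x) →
    (∀ j : Nat, hi ≤ (j : Int) → ∀ hj : j < xs.length, x ≤ xs[j]) →
    lo ≤ firstAtLeast xs x lo hi ∧ firstAtLeast xs x lo hi ≤ hi ∧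
    (∀ j : Nat, (j : Int) < firstAtLeast xs x lo hi → ∀ hj : j < xs.length, xs[j] < x) ∧
    (∀ j : Nat, firstAtLeast xs x lo hi ≤ (j : Int) → ∀ hj : j < xs.length, x ≤ xs[j]) := by
  have hmono : ∀ (p q : Nat) (hpq : p ≤ q) (hq : q < xs.length), xs[p]'(Nat.lt_of_le_of_lt hpq hq) ≤ xs[q] := by
    intro p q hpq hq
    have hple : p < xs.length := Nat.lt_of_le_of_lt hpq hq
    rcases Nat.lt_or_ge p q with hlt | hge
    · exact List.pairwise_iff_getElem.mp hsort p q hple hq hlt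
    · have : p = q := by omega
      subst this; exact le_refl _
  intro fuel
  induction fuel using Nat.strong_induction_on with
  | _ fuel ih =>
    intro lo hi hf h0 hlh hhl hlow hhigh
    rw [firstAtLeast]
    by_cases hlt : lo < hi
    · rw [if_pos hlt]
      have hb := PySem.Int.floordiv_two_mid_bounds (lo := lo) (hi := hi) (by omega)
      set mid := PySem.Int.floordiv (lo + hi) 2 with hmid
      have hmidlt : mid < hi := by
        rw [hmid, PySem.Int.floordiv_lt_iff_lt_mul (by norm_num)]; omega
      have hmidlen : mid.toNat < xs.length := by omega
      have hmidcast : (mid.toNat : Int) = mid := Int.toNat_of_nonneg (by omega)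
      have hgd : (PySem.List.pyGet? xs mid).getD 0 = xs[mid.toNat] := by
        conv_lhs => rw [← hmidcast]
        exact pyGetD_nat xs mid.toNat hmidlen
      by_cases hc : (PySem.List.pyGet? xs mid).getD 0 < x
      · rw [if_pos hc]
        have hxm : xs[mid.toNat] < x := by rwa [hgd] at hc
        have hlow' : ∀ j : Nat, (j : Int) < mid + 1 → ∀ hj : j < xs.length, xs[j] < x := by
          intro j hjm hj
          rcases lt_or_ge (j : Int) lo with hcase | hcase
          · exact hlow j hcase hj
          · exact lt_of_le_of_lt (hmono j mid.toNat (by omega) hmidlen) hxm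
        have := ih (hi - (mid + 1)).toNat (by omega) (mid + 1) hi rfl (by omega) (by omega) hhl
          hlow' hhigh
        exact ⟨by omega, this.2.1, this.2.2.1, this.2.2.2⟩
      · rw [if_neg hc]
        have hxm : x ≤ xs[mid.toNat] := by rw [hgd] at hc; omega
        have hhigh' : ∀ j : Nat, mid ≤ (j : Int) → ∀ hj : j < xs.length, x ≤ xs[j] := by
          intro j hjm hj
          exact le_trans hxm (hmono mid.toNat j (by omega) hj)
        have := ih (mid - lo).toNat (by omega) lo mid rfl h0 (by omega) (by omega)
          hlow hhigh'
        exact ⟨this.1, by omega, this.2.2.1, this.2.2.2⟩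
    · rw [if_neg hlt]
      have : lo = hi := by omega
      exact ⟨le_refl _, by omega, hlow, by intro j hj; exact hhigh j (by omega)⟩

-- cyclic distance arithmetic: walking (mod (s-h) m) steps from h lands on s
lemma dist_walk (m h s : Int) (hm : 0 < m) (h0 : 0 ≤ s) (h1 : s < m) :
    PySem.Int.mod (h + ((PySem.Int.mod (s - h) m).toNat : Int)) m = s := by
  rw [Int.toNat_of_nonneg (PySem.Int.mod_nonneg _ hm), add_comm, mod_shift m (s-h) h hm,
      sub_add_cancel]
  exact mod_id m s h0 h1

-- the cyclic distance from h, written out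
lemma dist_eq (m h s : Int) (hm : 0 < m) (h0 : 0 ≤ h) (h1 : h < m) (hs0 : 0 ≤ s) (hs1 : s < m) :
    PySem.Int.mod (s - h) m = if h ≤ s then s - h else s - h + m := by
  split_ifs with hc
  · exact mod_id m (s - h) (by omega) (by omega)
  · have heq : s - h + m = s - h + m * 1 := by ring
    have : PySem.Int.mod (s - h) m = PySem.Int.mod (s - h + m) m := by
      rw [heq, PySem.Int.mod_eq_emod_of_pos hm, PySem.Int.mod_eq_emod_of_pos hm,
          Int.add_mul_emod_self_left]
    rw [this]
    exact mod_id m (s - h + m) (by omega) (by omega)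

lemma step_eq (m : Int) (hm : 0 < m) (used free : List Int) (hInv : PHInv m used free)
    (hne : free ≠ []) (h : Int) (h0 : 0 ≤ h) (h1 : h < m) :
    ∃ slot rest,
      probeA used m h m.toNat = slot ∧
      (PySem.List.pop? free (if firstAtLeast free h 0 (free.length : Int) == (free.length : Int)
          then 0 else firstAtLeast free h 0 (free.length : Int))).getD (0, free) = (slot, rest) ∧
      0 ≤ slot ∧
      PHInv m (used.set slot.toNat 1) rest ∧
      rest.length + 1 = free.length := by
  obtain ⟨hlen, hsort, hbnd, hmem⟩ := hInv
  have hnd : free.Nodup := hsort.imp ne_of_lt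
  have hmono : ∀ (p q : Nat) (hpq : p ≤ q) (hq : q < free.length),
      free[p]'(Nat.lt_of_le_of_lt hpq hq) ≤ free[q] := by
    intro p q hpq hq
    have hple : p < free.length := Nat.lt_of_le_of_lt hpq hq
    rcases Nat.lt_or_ge p q with hlt | hge
    · exact le_of_lt (List.pairwise_iff_getElem.mp hsort p q hple hq hlt)
    · have : p = q := by omega
      subst this; exact le_refl _
  obtain ⟨s0, hs0mem⟩ := List.exists_mem_of_ne_nil free hne
  have hfreeAt : ∀ s ∈ free, PySem.List.pyGet? used
      (PySem.Int.mod (h + ((PySem.Int.mod (s - h) m).toNat : Int)) m) ≠ some 1 := by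
    intro s hs
    rw [dist_walk m h s hm (hbnd s hs).1 (hbnd s hs).2]
    exact (hmem s (hbnd s hs).1 (hbnd s hs).2).mp hs
  have hex : ∃ k : Nat, PySem.List.pyGet? used (PySem.Int.mod (h + (k:Int)) m) ≠ some 1 :=
    ⟨_, hfreeAt s0 hs0mem⟩
  set d := Nat.find hex with hdDef
  have hd : PySem.List.pyGet? used (PySem.Int.mod (h + (d:Int)) m) ≠ some 1 := Nat.find_spec hex
  have hdmin : ∀ k : Nat, k < d → PySem.List.pyGet? used (PySem.Int.mod (h + (k:Int)) m) = some 1 := by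
    intro k hk
    exact Decidable.not_not.mp (Nat.find_min hex hk)
  have hge : ∀ s ∈ free, (d:Int) ≤ PySem.Int.mod (s - h) m := by
    intro s hs
    have hk : d ≤ (PySem.Int.mod (s - h) m).toNat := Nat.find_min' hex (hfreeAt s hs)
    have := Int.toNat_of_nonneg (PySem.Int.mod_nonneg (s-h) hm)
    omega
  set slot := PySem.Int.mod (h + (d:Int)) m with hslotDef
  have hslot0 : 0 ≤ slot := PySem.Int.mod_nonneg _ hm
  have hslot1 : slot < m := PySem.Int.mod_lt _ hm
  have hslotFree : slot ∈ free := (hmem slot hslot0 hslot1).mpr hd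
  have hdlt : d < m.toNat := by
    have h2 := hge slot hslotFree
    have h3 : PySem.Int.mod (slot - h) m < m := PySem.Int.mod_lt _ hm
    omega
  have hkeySlot : PySem.Int.mod (slot - h) m = (d:Int) := by
    rw [hslotDef, sub_eq_add_neg, mod_shift m (h + (d:Int)) (-h) hm]
    have : h + (d:Int) + -h = (d:Int) := by ring
    rw [this]; exact mod_id m _ (by omega) (by omega)
  have huniq : ∀ s ∈ free, PySem.Int.mod (s - h) m = (d:Int) → s = slot := by
    intro s hs hkey
    have := dist_walk m h s hm (hbnd s hs).1 (hbnd s hs).2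
    rw [hkey] at this
    simpa [hslotDef, Int.toNat_natCast] using this.symm
  -- the binary search finds the first free slot ≥ h, if any
  set L : Int := (free.length : Int) with hLdef
  have hspec := firstAtLeast_spec free h (hsort.imp le_of_lt) (L - 0).toNat 0 L rfl
    le_rfl (by omega) le_rfl
    (fun j hj => absurd hj (by omega))
    (fun j hj hjl => absurd hj (by omega))
  set r := firstAtLeast free h 0 L with hrDef
  obtain ⟨hr0, hrL, hpre, hpost⟩ := hspec
  set i : Int := if r == L then 0 else r with hiDef
  have hLpos : 0 < L := by
    have : free.length ≠ 0 := fun hz => hne (List.eq_nil_of_length_eq_zero hz)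
    omega
  have hi0 : 0 ≤ i := by
    rw [hiDef]; split_ifs <;> omega
  have hiL : i < L := by
    rw [hiDef]; split_ifs with hc
    · omega
    · have : ¬ r = L := by simpa using hc
      omega
  have hiLen : i.toNat < free.length := by omega
  have hicast : ((i.toNat : Nat) : Int) = i := Int.toNat_of_nonneg hi0
  set slotC := free[i.toNat]'hiLen with hslotCDef
  have hslotCmem : slotC ∈ free := List.getElem_mem hiLen
  -- slotC minimises the cyclic distance over the free list
  have hminC : ∀ s ∈ free, PySem.Int.mod (slotC - h) m ≤ PySem.Int.mod (s - h) m := by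
    intro s hs
    obtain ⟨q, hq, hqs⟩ := List.mem_iff_getElem.mp hs
    have hsb := hbnd s hs
    have hCb := hbnd slotC hslotCmem
    rw [dist_eq m h s hm h0 h1 hsb.1 hsb.2, dist_eq m h slotC hm h0 h1 hCb.1 hCb.2]
    by_cases hrL' : r = L
    · -- every free slot is < h: wrap to the smallest one, free[0]
      have hiz : i = 0 := by rw [hiDef, if_pos (beq_iff_eq.mpr hrL')]
      have hsh : s < h := by
        have := hpre q (by omega) hq
        omega
      have hCs : slotC ≤ s := by
        have := hmono i.toNat q (by omega) hq
        rw [hqs] at this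
        exact this
      rw [if_neg (by omega), if_neg (by omega)]
      omega
    · -- free[r] is the least free slot ≥ h
      have hir : i = r := by rw [hiDef, if_neg (by simpa using hrL')]
      have hCh : h ≤ slotC := hpost i.toNat (by omega) hiLen
      by_cases hsh : h ≤ s
      · have hqr : ¬ ((q:Int) < r) := by
          intro hqlt
          have := hpre q hqlt hq
          omega
        have hCs : slotC ≤ s := by
          have := hmono i.toNat q (by omega) hq
          rw [hqs] at this
          exact this
        rw [if_pos hsh, if_pos hCh]
        omega
      · rw [if_neg hsh, if_pos hCh]
        omega
  have hdC : PySem.Int.mod (slotC - h) m = (d:Int) :=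
    le_antisymm (hkeySlot ▸ hminC slot hslotFree) (hge slotC hslotCmem)
  have hCslot : slotC = slot := huniq slotC hslotCmem hdC
  have hpop : PySem.List.pop? free i = some (slotC, free.eraseIdx i.toNat) := by
    conv_lhs => rw [← hicast]
    exact PySem.List.pop?_natCast free i.toNat hiLen
  -- free minus slotC, as a permutation
  have hdecomp : free = free.take i.toNat ++ free[i.toNat] :: free.drop (i.toNat + 1) := by
    conv_lhs => rw [← List.take_append_drop i.toNat free, List.drop_eq_getElem_cons hiLen]
  have hperm : free.Perm (slotC :: free.eraseIdx i.toNat) := by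
    rw [List.eraseIdx_eq_take_drop_succ]
    conv_lhs => rw [hdecomp]
    exact List.perm_middle
  have hndSR : (slotC :: free.eraseIdx i.toNat).Nodup := (hperm.nodup_iff).mp hnd
  have hslotNotMem : slotC ∉ free.eraseIdx i.toNat := (List.nodup_cons.mp hndSR).1
  have hmemSplit : ∀ s, s ∈ free ↔ s = slotC ∨ s ∈ free.eraseIdx i.toNat := by
    intro s
    rw [hperm.mem_iff, List.mem_cons]
  refine ⟨slot, free.eraseIdx i.toNat,
    probeA_eq used m hm d h m.toNat h0 h1 (by omega) hdmin hd, ?_, hslot0, ?_, ?_⟩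
  · rw [hpop, Option.getD_some, hCslot]
  · -- PHInv is preserved
    refine ⟨by simp [hlen], hsort.sublist (List.eraseIdx_sublist free i.toNat), ?_, ?_⟩
    · intro s hs
      exact hbnd s ((hmemSplit s).mpr (Or.inr hs))
    · intro s hs0 hs1
      have hsNat : s = ((s.toNat : Nat) : Int) := (Int.toNat_of_nonneg hs0).symm
      have hget : PySem.List.pyGet? (used.set slot.toNat 1) s
          = if slot.toNat = s.toNat then some 1 else PySem.List.pyGet? used s := by
        rw [hsNat, PySem.List.pyGet?_natCast, PySem.List.pyGet?_natCast, Int.toNat_natCast,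
          List.getElem?_set]
        have hlt : slot.toNat < used.length := by omega
        by_cases hEq : slot.toNat = s.toNat
        · rw [if_pos hEq, if_pos hlt, if_pos hEq]
        · rw [if_neg hEq, if_neg hEq]
      rw [hget]
      by_cases hEq : s = slot
      · subst hEq
        have hnm : slot ∉ free.eraseIdx i.toNat := by rw [← hCslot]; exact hslotNotMem
        simp [hnm]
      · have : ¬ slot.toNat = s.toNat := by omega
        rw [if_neg this]
        constructor
        · intro hs
          exact (hmem s hs0 hs1).mp ((hmemSplit s).mpr (Or.inr hs))
        · intro hs
          rcases (hmemSplit s).mp ((hmem s hs0 hs1).mpr hs) with hc | hc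
          · exact absurd (hc.trans hCslot) hEq
          · exact hc
  · have := hperm.length_eq
    simp only [List.length_cons] at this
    omega

lemma loop_eq (m : Int) (hm : 0 < m) (djb2x : String → Int) :
    ∀ (ks : List String) (dA dB : PySem.Dict String Int) (used free : List Int),
    dA = dB → PHInv m used free → ks.length ≤ free.length →
    (ks.foldl (fun (st : PySem.Dict String Int × List Int) key =>
        let h0 := PySem.Int.mod (djb2x key) m
        let h := probeA st.2 m h0 m.toNat
        (st.1.insert key h, st.2.set h.toNat 1)) (dA, used)).1 =
    (ks.foldl (fun (st : PySem.Dict String Int × List Int) key =>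
        let h := PySem.Int.mod (djb2x key) m
        let i0 := firstAtLeast st.2 h 0 (st.2.length : Int)
        let i := if i0 == (st.2.length : Int) then 0 else i0
        let p := (PySem.List.pop? st.2 i).getD (0, st.2)
        (st.1.insert key p.1, p.2)) (dB, free)).1 := by
  intro ks
  induction ks with
  | nil => intro dA dB used free hd _ _; simpa using hd
  | cons k ks ih =>
    intro dA dB used free hd hInv hlen
    have hne : free ≠ [] := by
      intro hnil; rw [hnil] at hlen; simp at hlen
    obtain ⟨slot, rest, hprobe, hpop, hs0, hInv', hlen'⟩ :=
      step_eq m hm used free hInv hne (PySem.Int.mod (djb2x k) m)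
        (PySem.Int.mod_nonneg _ hm) (PySem.Int.mod_lt _ hm)
    simp only [List.foldl_cons]
    rw [hprobe, hpop]
    exact ih (dA.insert k slot) (dB.insert k slot) _ _ (by rw [hd]) hInv'
      (show ks.length ≤ rest.length by simp only [List.length_cons] at hlen; omega)

-- ===== VERDICT (by name: the statement is the Claim_ definition above) =====
theorem perfect_hash_small_spec : Claim_equal_perfect_hash_small := by
  intro keys _
  unfold Spec_perfect_hash_small perfect_hash_small perfect_hash_small_alt
  cases keys with
  | nil => rfl
  | cons x xs =>
    have hfalse : ¬ ((((x :: xs).length : Int) == 0) = true) := by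
      simp only [List.length_cons, beq_iff_eq]
      omega
    rw [if_neg hfalse, if_neg hfalse]
    have hL : (0 : Int) < ((x :: xs).length : Int) := by
      simp only [List.length_cons]; positivity
    have hm : (0 : Int) < ((x :: xs).length : Int) * 2 := by omega
    apply congrArg PySem.Dict.items
    rw [PySem.List.foldl_append_singleton_eq_map (f := fun _ => (0 : Int)), List.nil_append]
    apply loop_eq (((x :: xs).length : Int) * 2) hm djb2_hash (x :: xs)
      PySem.Dict.empty PySem.Dict.empty _ _ rfl
    · -- PHInv for the initial table
      refine ⟨?_, PySem.List.pairwise_lt_pyRange_one _ _, ?_, ?_⟩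
      · rw [List.length_map, PySem.List.length_pyRange_one]; omega
      · intro s hs; exact PySem.List.mem_pyRange_one.mp hs
      · intro s hs0 hs1
        have hlt : s.toNat < (PySem.List.pyRange 0 (((x :: xs).length : Int) * 2) 1).length := by
          rw [PySem.List.length_pyRange_one]
          simp only [List.length_cons] at hs1 ⊢
          omega
        have hget : PySem.List.pyGet?
            ((PySem.List.pyRange 0 (((x :: xs).length : Int) * 2) 1).map (fun _ => (0 : Int))) s
            = some 0 := by
          rw [show s = ((s.toNat : Nat) : Int) from (Int.toNat_of_nonneg hs0).symm,
              PySem.List.pyGet?_natCast, List.getElem?_map, List.getElem?_eq_getElem hlt]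
          simp
        constructor
        · intro _; rw [hget]; simp
        · intro _; exact PySem.List.mem_pyRange_one.mpr ⟨hs0, hs1⟩
    · -- keys fit into the table
      rw [PySem.List.length_pyRange_one]
      simp only [List.length_cons]
      omega
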